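-- pv_equiv track=rewrite | github.com/pypi-data/pypi-mirror-42 | packages/mathml2latex/mathml2latex-0.2.11-py3-none-any.whl/mathml2latex/process_each_tag/mmultiscripts.py | convert2latex
-- ===== SOURCE A (Python) =====
-- def convert2latex(inspected_child_list):
--
--     temp_list = []
--     i = 0
--
--     for child in inspected_child_list:
--         if child == 'nnnn':
--             continue
--         elif child == '':
--             continue
--         elif i % 2:
--             temp_list.append('_{{{}}}'.format(child))
--         else:
--             temp_list.append('^{{{}}}'.format(child))
--         i += 1
--
--     return temp_list
-- ===== SOURCE B (Python) =====
-- def convert2latex(inspected_child_list):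
--     # kept children (neither 'nnnn' nor ''), consumed two at a time:
--     # each step emits a superscript and, if another child remains, a subscript.
--     kept = iter(c for c in inspected_child_list if c not in ('nnnn', ''))
--     out = []
--     for sup in kept:
--         out.append('^{{{}}}'.format(sup))
--         sub = next(kept, None)
--         if sub is None:
--             break
--         out.append('_{{{}}}'.format(sub))
--     return out
-- ===== Notes on version B (the rewrite author's own statement) =====
-- stated objective: simpler
-- what changed: Replaces A's single loop with a manual counter and parity test by pairwise consumption of an iterator over the kept children: each step pulls two children and emits a superscript then a subscript, with no counter or parity arithmetic at all.
import Mathlib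
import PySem

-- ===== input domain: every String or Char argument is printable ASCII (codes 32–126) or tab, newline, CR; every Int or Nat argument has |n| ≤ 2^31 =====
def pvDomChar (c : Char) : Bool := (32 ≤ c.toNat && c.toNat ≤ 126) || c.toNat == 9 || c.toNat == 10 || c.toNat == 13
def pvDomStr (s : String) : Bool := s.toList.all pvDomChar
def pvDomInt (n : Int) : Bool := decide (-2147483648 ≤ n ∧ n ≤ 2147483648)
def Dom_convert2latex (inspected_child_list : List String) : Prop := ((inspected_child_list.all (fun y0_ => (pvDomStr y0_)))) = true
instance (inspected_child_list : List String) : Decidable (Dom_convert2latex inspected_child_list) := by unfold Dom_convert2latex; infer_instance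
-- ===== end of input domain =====

-- B replaces A's counter-and-parity loop by a pairwise consumption of the
-- filtered children (superscript then subscript per step) (objective: simpler). A is total.

-- ===== PORT A =====
-- A: one loop over the children, skipping 'nnnn'/'' without advancing the counter i,
-- appending '_{c}' when i is odd and '^{c}' when i is even; state = (temp_list, i).
def convert2latex (inspected_child_list : List String) : List String :=
  (inspected_child_list.foldl
    (fun (st : List String × Int) child =>
      if child = "nnnn" then st
      else if child = "" then st
      else if st.2 % 2 ≠ 0 then (st.1 ++ ["_{" ++ child ++ "}"], st.2 + 1)
      else (st.1 ++ ["^{" ++ child ++ "}"], st.2 + 1))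
    ([], 0)).1

-- ===== PORT B =====
-- B's pairwise loop: each step consumes a superscript child and, if present, a subscript child.
def pvPairs : List String → List String
  | [] => []
  | [x] => ["^{" ++ x ++ "}"]
  | x :: y :: rest => ("^{" ++ x ++ "}") :: ("_{" ++ y ++ "}") :: pvPairs rest

-- B: filter out 'nnnn' and '', then emit sup/sub pairs two children at a time.
def convert2latex_alt (inspected_child_list : List String) : List String :=
  pvPairs (inspected_child_list.filter (fun c => !(c == "nnnn") && !(c == "")))

-- ===== PRECONDITION & SPEC =====
def Spec_convert2latex (inspected_child_list : List String) (out : List String) : Prop := out = convert2latex_alt inspected_child_list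
instance (inspected_child_list : List String) (out : List String) : Decidable (Spec_convert2latex inspected_child_list out) := by unfold Spec_convert2latex; infer_instance

-- ===== CLAIM (what is proved, stated in full; the proofs are below) =====
def Claim_equal_convert2latex : Prop := ∀ (inspected_child_list : List String), Dom_convert2latex inspected_child_list → Spec_convert2latex inspected_child_list (convert2latex inspected_child_list)

-- ===== LEMMAS AND PROOFS =====

-- Proof helper: the "odd-phase" companion of pvPairs (next kept child gets '_').
def pvPairsSub : List String → List String
  | [] => []
  | x :: rest => ("_{" ++ x ++ "}") :: pvPairs rest

theorem pvPairs_cons (x : String) (xs : List String) :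
    pvPairs (x :: xs) = ("^{" ++ x ++ "}") :: pvPairsSub xs := by
  cases xs <;> rfl

-- Loop invariant: from state (acc, i), A's loop yields acc followed by the
-- pair expansion of the filtered remainder, in the phase given by i's parity.
theorem convert2latex_loop (l : List String) (acc : List String) (i : Int) :
    (l.foldl
      (fun (st : List String × Int) child =>
        if child = "nnnn" then st
        else if child = "" then st
        else if st.2 % 2 ≠ 0 then (st.1 ++ ["_{" ++ child ++ "}"], st.2 + 1)
        else (st.1 ++ ["^{" ++ child ++ "}"], st.2 + 1))
      (acc, i)).1
    = acc ++ (if i % 2 = 0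
        then pvPairs (l.filter (fun c => !(c == "nnnn") && !(c == "")))
        else pvPairsSub (l.filter (fun c => !(c == "nnnn") && !(c == "")))) := by
  induction l generalizing acc i with
  | nil => by_cases h : i % 2 = 0 <;> simp [h, pvPairs, pvPairsSub]
  | cons c rest ih =>
    simp only [List.foldl_cons, List.filter_cons]
    by_cases h1 : c = "nnnn"
    · simpa [h1] using ih acc i
    · by_cases h2 : c = ""
      · simpa [h1, h2] using ih acc i
      · have hk : (!(c == "nnnn") && !(c == "")) = true := by simp [h1, h2]
        rw [if_neg h1, if_neg h2, hk, if_pos rfl]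
        by_cases h3 : i % 2 = 0
        · have hodd : (i + 1) % 2 ≠ 0 := by omega
          rw [if_neg (by simpa using h3), ih, if_pos h3, if_neg hodd,
            pvPairs_cons]
          simp
        · have heven : (i + 1) % 2 = 0 := by omega
          rw [if_pos h3, ih, if_neg h3, if_pos heven]
          simp [pvPairsSub]

-- ===== VERDICT (by name: the statement is the Claim_ definition above) =====
theorem convert2latex_spec : Claim_equal_convert2latex := by
  intro l _
  show convert2latex l = convert2latex_alt l
  simpa [convert2latex, convert2latex_alt] using convert2latex_loop l [] 0
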